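-- pv_equiv track=rewrite | github.com/lettucebowler/constant-sum | quartet.py | getSumpairs
-- ===== SOURCE A (Python) =====
-- def getSumpairs(total, part, g):
--     groupList = list()
--     group = list()
--     lista = list()
--     listb = list()
--     numList = list(range(total))
--     allSame = False
--
--     # Determine spot to split list
--     if allSame:
--         testValue = g * 2 // part[0]
--     else:
--         testValue = g
--     # Split numList into two lists containing pairs summing to g (MOD P)
--     for j in numList:
--         if j > testValue:
--             if j not in lista or j not in listb:
--                 listb.append(j)
--         else:
--             if j not in lista or j not in listb:
--                 lista.append(j)
--
--     # Populate each p in P with a pair that sums to g (MOD n)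
--     for numeral in range(total // 2 - 1):
--         groupList.append(list())
--         if len(lista) >= 2:
--             groupList[numeral].append(lista.pop(0))
--             groupList[numeral].append(lista.pop())
--
--         elif len(listb) >= 2:
--                 groupList[numeral].append(listb.pop(0))
--                 groupList[numeral].append(listb.pop())
--
--     # Combine the remaining elements in lista and listb back into numList
--     numList = lista + listb
--     numList.sort()
--
--     return groupList
-- ===== SOURCE B (Python) =====
-- def getSumpairs(total, part, g):
--     # Two-pointer pairing over the index ranges themselves: lista is the run
--     # 0..min(g, total-1), listb the run max(g+1, 0)..total-1; no lists are
--     # materialised and no linear membership scans or pop(0) shifts are done.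
--     a_lo, a_hi = 0, min(g, total - 1)
--     b_lo, b_hi = max(g + 1, 0), total - 1
--     groups = []
--     for _ in range(total // 2 - 1):
--         if a_hi - a_lo >= 1:
--             groups.append([a_lo, a_hi])
--             a_lo += 1
--             a_hi -= 1
--         elif b_hi - b_lo >= 1:
--             groups.append([b_lo, b_hi])
--             b_lo += 1
--             b_hi -= 1
--         else:
--             groups.append([])
--     return groups
-- ===== Notes on version B (the rewrite author's own statement) =====
-- stated objective: faster
-- what changed: B never materialises the number lists: it pairs directly over the two index runs with four integer pointers, replacing A's list construction with linear membership tests and pop(0)/pop() shifting.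
import Mathlib
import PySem

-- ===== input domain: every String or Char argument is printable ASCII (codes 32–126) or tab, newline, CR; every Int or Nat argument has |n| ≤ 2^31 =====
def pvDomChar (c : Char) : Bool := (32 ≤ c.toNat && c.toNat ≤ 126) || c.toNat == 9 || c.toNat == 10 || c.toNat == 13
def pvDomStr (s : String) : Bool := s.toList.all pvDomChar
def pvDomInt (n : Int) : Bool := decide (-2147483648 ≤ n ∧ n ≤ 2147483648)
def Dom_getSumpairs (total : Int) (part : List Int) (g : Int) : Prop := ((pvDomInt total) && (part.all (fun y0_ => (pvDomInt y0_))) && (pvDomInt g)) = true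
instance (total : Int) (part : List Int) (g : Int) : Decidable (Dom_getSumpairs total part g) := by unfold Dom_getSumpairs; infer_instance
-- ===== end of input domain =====

-- B replaces A's quadratic list building (linear membership tests) and pop(0)/pop()
-- pairing by direct two-pointer pairing over the two integer runs; equivalence proved.

-- ===== PORT A =====
-- the body of A's first loop ('for j in numList'); testValue = g since allSame is False
def aBuildStep (testValue : Int) (s : List Int × List Int) (j : Int) : List Int × List Int :=
  if j > testValue then
    if !(s.1.contains j) || !(s.2.contains j) then (s.1, s.2 ++ [j]) else s
  else
    if !(s.1.contains j) || !(s.2.contains j) then (s.1 ++ [j], s.2) else s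

-- the body of A's second loop: append an empty group, then pop(0)/pop() of lista
-- (or listb) into it; pop(0) = head, pop() = last of the tail, rest = tail.dropLast
def aPairStep (s : List (List Int) × List Int × List Int) : List (List Int) × List Int × List Int :=
  if s.2.1.length ≥ 2 then
    (s.1 ++ [[s.2.1.headD 0, s.2.1.tail.getLastD 0]], s.2.1.tail.dropLast, s.2.2)
  else if s.2.2.length ≥ 2 then
    (s.1 ++ [[s.2.2.headD 0, s.2.2.tail.getLastD 0]], s.2.1, s.2.2.tail.dropLast)
  else
    (s.1 ++ [[]], s.2.1, s.2.2)

def getSumpairs (total : Int) (part : List Int) (g : Int) : List (List Int) :=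
  -- allSame = False, so testValue = g (part is never read)
  let testValue := g
  let numList := PySem.List.pyRange 0 total 1
  let s := numList.foldl (aBuildStep testValue) ([], [])
  let r := (PySem.List.pyRange 0 (PySem.Int.floordiv total 2 - 1) 1).foldl
            (fun t (_ : Int) => aPairStep t) (([] : List (List Int)), s.1, s.2)
  r.1

-- ===== PORT B =====
def altLoop : Nat → Int → Int → Int → Int → List (List Int)
  | 0, _, _, _, _ => []
  | m + 1, aLo, aHi, bLo, bHi =>
    if aHi - aLo ≥ 1 then [aLo, aHi] :: altLoop m (aLo + 1) (aHi - 1) bLo bHi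
    else if bHi - bLo ≥ 1 then [bLo, bHi] :: altLoop m aLo aHi (bLo + 1) (bHi - 1)
    else [] :: altLoop m aLo aHi bLo bHi

def getSumpairs_alt (total : Int) (part : List Int) (g : Int) : List (List Int) :=
  altLoop (PySem.Int.floordiv total 2 - 1).toNat 0 (min g (total - 1)) (max (g + 1) 0) (total - 1)

-- ===== PRECONDITION & SPEC =====
def Spec_getSumpairs (total : Int) (part : List Int) (g : Int) (out : List (List Int)) : Prop := out = getSumpairs_alt total part g
instance (total : Int) (part : List Int) (g : Int) (out : List (List Int)) : Decidable (Spec_getSumpairs total part g out) := by unfold Spec_getSumpairs; infer_instance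

-- ===== CLAIM (what is proved, stated in full; the proofs are below) =====
def Claim_equal_getSumpairs : Prop := ∀ (total : Int) (part : List Int) (g : Int), Dom_getSumpairs total part g → Spec_getSumpairs total part g (getSumpairs total part g)

-- ===== LEMMAS AND PROOFS =====

-- the arithmetic run lo, lo+1, …, lo+n-1
def run (lo : Int) (n : Nat) : List Int := (List.range n).map (fun (i : Nat) => lo + (i : Int))

theorem run_concat (lo : Int) (n : Nat) : run lo (n + 1) = run lo n ++ [lo + n] := by
  simp [run, List.range_succ]

theorem run_cons (lo : Int) (n : Nat) : run lo (n + 1) = lo :: run (lo + 1) n := by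
  unfold run
  rw [List.range_succ_eq_map, List.map_cons, List.map_map]
  congr 1
  · norm_num
  · apply List.map_congr_left; intro i _; simp [Function.comp]; ring

theorem mem_run (x lo : Int) (n : Nat) : x ∈ run lo n ↔ lo ≤ x ∧ x < lo + n := by
  unfold run
  rw [List.mem_map]
  constructor
  · rintro ⟨i, hi, rfl⟩
    rw [List.mem_range] at hi
    omega
  · rintro ⟨h1, h2⟩
    exact ⟨(x - lo).toNat, List.mem_range.mpr (by omega), by omega⟩

theorem length_run (lo : Int) (n : Nat) : (run lo n).length = n := by simp [run]

theorem headD_run (lo : Int) (n : Nat) : (run lo (n + 1)).headD 0 = lo := by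
  rw [run_cons]; rfl

theorem tail_run (lo : Int) (n : Nat) : (run lo (n + 1)).tail = run (lo + 1) n := by
  rw [run_cons]; rfl

theorem getLastD_run (lo : Int) (n : Nat) : (run lo (n + 1)).getLastD 0 = lo + n := by
  rw [run_concat]; simp

theorem dropLast_run (lo : Int) (n : Nat) : (run lo (n + 1)).dropLast = run lo n := by
  rw [run_concat]; simp

-- Phase 1: the first loop builds the two runs (the membership test is always true
-- because each j of range(total) is fresh).
theorem buildRun (g : Int) (n : Nat) :
    (run 0 n).foldl (aBuildStep g) ([], []) =
      (run 0 (min (g + 1).toNat n), run (max (g + 1) 0) (n - (g + 1).toNat)) := by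
  induction n with
  | zero => simp [run]
  | succ n ih =>
    rw [run_concat, List.foldl_append, ih]
    simp only [List.foldl_cons, List.foldl_nil, aBuildStep]
    by_cases hg : (0 : Int) + n > g
    · rw [if_pos hg, if_pos (by simp [mem_run])]
      have h1 : min (g + 1).toNat (n + 1) = min (g + 1).toNat n := by omega
      have h2 : n + 1 - (g + 1).toNat = (n - (g + 1).toNat) + 1 := by omega
      rw [h1, h2, run_concat]
      have h3 : max (g + 1) 0 + ((n - (g + 1).toNat : Nat) : Int) = (0 : Int) + n := by omega
      rw [h3]
    · rw [if_neg hg, if_pos (by simp [mem_run])]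
      have h1 : min (g + 1).toNat (n + 1) = (min (g + 1).toNat n) + 1 := by omega
      have h2 : n + 1 - (g + 1).toNat = n - (g + 1).toNat := by omega
      have h3 : min (g + 1).toNat n = n := by omega
      rw [h1, h2, run_concat, h3]

-- a fold whose body ignores the element is iteration of the step, length many times
theorem foldl_const_iter {α β : Type} (f : α → α) :
    ∀ (l : List β) (s : α), l.foldl (fun t (_ : β) => f t) s = f^[l.length] s := by
  intro l
  induction l with
  | nil => intro s; rfl
  | cons x l ih => intro s; simp [List.foldl_cons, ih, Function.iterate_succ_apply]

-- the pointer pair (lo, hi) represents the run of length n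
def PairInv (lo hi : Int) (n : Nat) : Prop := (n : Int) = hi + 1 - lo ∨ (n = 0 ∧ hi + 1 - lo ≤ 0)

-- Phase 2: A's pairing loop on the runs equals B's two-pointer loop.
theorem pairIter (m : Nat) : ∀ (gs : List (List Int)) (aLo aHi bLo bHi : Int) (na nb : Nat),
    PairInv aLo aHi na → PairInv bLo bHi nb →
    (aPairStep^[m] (gs, run aLo na, run bLo nb)).1 = gs ++ altLoop m aLo aHi bLo bHi := by
  induction m with
  | zero => intro gs _ _ _ _ _ _ _ _; simp [altLoop]
  | succ m ih =>
    intro gs aLo aHi bLo bHi na nb ha hb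
    rw [Function.iterate_succ_apply, altLoop]
    by_cases hA : aHi - aLo ≥ 1
    · have hna : (na : Int) = aHi + 1 - aLo := by rcases ha with h | h <;> omega
      obtain ⟨k, rfl⟩ : ∃ k, na = k + 2 := ⟨na - 2, by omega⟩
      have hstep : aPairStep (gs, run aLo (k + 2), run bLo nb) =
          (gs ++ [[aLo, aHi]], run (aLo + 1) k, run bLo nb) := by
        simp only [aPairStep, length_run]
        rw [if_pos (by omega)]
        rw [headD_run, tail_run, getLastD_run, dropLast_run]
        have h4 : aLo + 1 + (k : Int) = aHi := by omega
        rw [h4]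
      rw [hstep, if_pos hA,
          ih (gs ++ [[aLo, aHi]]) (aLo + 1) (aHi - 1) bLo bHi k nb (by unfold PairInv; omega) hb]
      simp
    · have hna1 : ¬ ((run aLo na).length ≥ 2) := by
        rw [length_run]; rcases ha with h | h <;> omega
      by_cases hB : bHi - bLo ≥ 1
      · have hnb : (nb : Int) = bHi + 1 - bLo := by rcases hb with h | h <;> omega
        obtain ⟨k, rfl⟩ : ∃ k, nb = k + 2 := ⟨nb - 2, by omega⟩
        have hstep : aPairStep (gs, run aLo na, run bLo (k + 2)) =
            (gs ++ [[bLo, bHi]], run aLo na, run (bLo + 1) k) := by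
          simp only [aPairStep, length_run]
          rw [if_neg (by rw [length_run] at hna1; omega), if_pos (by omega)]
          rw [headD_run, tail_run, getLastD_run, dropLast_run]
          have h4 : bLo + 1 + (k : Int) = bHi := by omega
          rw [h4]
        rw [hstep, if_neg hA, if_pos hB,
            ih (gs ++ [[bLo, bHi]]) aLo aHi (bLo + 1) (bHi - 1) na k ha (by unfold PairInv; omega)]
        simp
      · have hnb1 : ¬ ((run bLo nb).length ≥ 2) := by
          rw [length_run]; rcases hb with h | h <;> omega
        have hstep : aPairStep (gs, run aLo na, run bLo nb) =
            (gs ++ [[]], run aLo na, run bLo nb) := by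
          simp only [aPairStep]
          rw [if_neg hna1, if_neg hnb1]
        rw [hstep, if_neg hA, if_neg hB,
            ih (gs ++ [[]]) aLo aHi bLo bHi na nb ha hb]
        simp

theorem pyRange_zero_run (t : Int) : PySem.List.pyRange 0 t 1 = run 0 t.toNat := by
  rw [PySem.List.pyRange_one]; unfold run; norm_num

-- ===== VERDICT (by name: the statement is the Claim_ definition above) =====
theorem getSumpairs_spec : Claim_equal_getSumpairs := by
  intro total part g _
  unfold Spec_getSumpairs getSumpairs getSumpairs_alt
  simp only []
  rw [pyRange_zero_run, buildRun]
  rw [foldl_const_iter aPairStep]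
  rw [PySem.List.length_pyRange_one]
  have h0 : (PySem.Int.floordiv total 2 - 1 - 0).toNat = (PySem.Int.floordiv total 2 - 1).toNat := by
    norm_num
  rw [h0]
  rw [pairIter _ [] 0 (min g (total - 1)) (max (g + 1) 0) (total - 1) _ _
      (by unfold PairInv; omega) (by unfold PairInv; omega)]
  simp
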